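-- pv_equiv track=rewrite | github.com/Suff1ce/RLPP-V1 | RLPP-master/Python_Ver/export_decoding_params_to_csv.py | ensemble_ny_his_for_input_dim
-- ===== SOURCE A (Python) =====
-- def ensemble_ny_his_for_input_dim(input_dim: int) -> tuple[int, int]:
--     """
--     Pick (Ny, his) so (his+1)*Ny == input_dim (same stacking as emulator_real.py).
--     Matches bundled decodingModel_01 (122) and decodingModel_02 (183) layouts.
--     """
--     if input_dim == 122:
--         return 61, 1
--     if input_dim == 183:
--         return 61, 2
--     if input_dim == 24:
--         return 8, 2
--     for his in range(0, 32):
--         if input_dim % (his + 1) != 0: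
--             continue
--         ny = input_dim // (his + 1)
--         if ny >= 1:
--             return ny, his
--     raise ValueError(f"ensemble_ny_his_for_input_dim: cannot factor input_dim={input_dim}")
-- ===== SOURCE B (Python) =====
-- _SPECIAL = {122: (61, 1), 183: (61, 2), 24: (8, 2)}
--
-- def ensemble_ny_his_for_input_dim(input_dim: int) -> tuple[int, int]:
--     """Closed form: special layouts come from a table; any other positive
--     input_dim trivially factors as (input_dim, 0)."""
--     hit = _SPECIAL.get(input_dim)
--     if hit is not None:
--         return hit
--     if input_dim >= 1:
--         return input_dim, 0
--     raise ValueError(f"ensemble_ny_his_for_input_dim: cannot factor input_dim={input_dim}")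
-- ===== Notes on version B (the rewrite author's own statement) =====
-- stated objective: simpler
-- what changed: Replaced the bounded search loop over his in range(32) with a closed form: a literal table for the three special layouts, then (input_dim, 0) for any positive input_dim, since A's loop always returns at his=0 when input_dim >= 1 and raises otherwise.
import Mathlib
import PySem

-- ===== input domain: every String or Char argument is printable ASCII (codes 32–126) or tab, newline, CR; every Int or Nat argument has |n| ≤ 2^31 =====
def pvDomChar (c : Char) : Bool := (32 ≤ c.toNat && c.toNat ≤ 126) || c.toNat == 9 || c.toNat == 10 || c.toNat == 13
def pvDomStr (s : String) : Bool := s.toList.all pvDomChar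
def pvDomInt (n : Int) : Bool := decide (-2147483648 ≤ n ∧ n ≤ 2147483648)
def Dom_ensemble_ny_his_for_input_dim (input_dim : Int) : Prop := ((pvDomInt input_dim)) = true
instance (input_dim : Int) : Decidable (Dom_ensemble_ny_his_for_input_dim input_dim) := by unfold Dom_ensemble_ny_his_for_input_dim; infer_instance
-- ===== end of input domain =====

-- B replaces A's bounded search loop with a table lookup plus a closed form (input_dim, 0) for positive inputs (objective: simpler).


-- ===== PORT A =====
-- the 'for his in range(0,32)' loop, step for step; 'none' = fell through to the raise
def ensembleLoopA (input_dim : Int) : List Int → Option (Int × Int)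
  | [] => none
  | his :: rest =>
    if PySem.Int.mod input_dim (his + 1) ≠ 0 then ensembleLoopA input_dim rest
    else
      let ny := PySem.Int.floordiv input_dim (his + 1)
      if ny ≥ 1 then some (ny, his) else ensembleLoopA input_dim rest

def ensemble_ny_his_for_input_dim (input_dim : Int) : Int × Int :=
  if input_dim = 122 then (61, 1)
  else if input_dim = 183 then (61, 2)
  else if input_dim = 24 then (8, 2)
  else (ensembleLoopA input_dim (PySem.List.pyRange 0 32 1)).getD (0, 0)  -- none = ValueError, outside Pre_

-- ===== PORT B =====
def ensembleSpecial : PySem.Dict Int (Int × Int) :=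
  PySem.Dict.ofList [(122, (61, 1)), (183, (61, 2)), (24, (8, 2))]

def ensemble_ny_his_for_input_dim_alt (input_dim : Int) : Int × Int :=
  match PySem.Dict.get? ensembleSpecial input_dim with
  | some hit => hit
  | none => if input_dim ≥ 1 then (input_dim, 0) else (0, 0)  -- else: ValueError, outside Pre_

-- ===== PRECONDITION & SPEC =====
-- A raises ValueError exactly when input_dim ≤ 0
def Pre_ensemble_ny_his_for_input_dim (input_dim : Int) : Prop := 1 ≤ input_dim
instance (input_dim : Int) : Decidable (Pre_ensemble_ny_his_for_input_dim input_dim) := by unfold Pre_ensemble_ny_his_for_input_dim; infer_instance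
def pvWitness_ensemble_ny_his_for_input_dim : Int := 122

def Spec_ensemble_ny_his_for_input_dim (input_dim : Int) (out : Int × Int) : Prop := out = ensemble_ny_his_for_input_dim_alt input_dim
instance (input_dim : Int) (out : Int × Int) : Decidable (Spec_ensemble_ny_his_for_input_dim input_dim out) := by unfold Spec_ensemble_ny_his_for_input_dim; infer_instance

-- ===== CLAIM (what is proved, stated in full; the proofs are below) =====
def Claim_equal_ensemble_ny_his_for_input_dim : Prop := ∀ (input_dim : Int), Dom_ensemble_ny_his_for_input_dim input_dim → Pre_ensemble_ny_his_for_input_dim input_dim → Spec_ensemble_ny_his_for_input_dim input_dim (ensemble_ny_his_for_input_dim input_dim)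

-- ===== LEMMAS AND PROOFS =====
theorem ensembleLoopA_pos (input_dim : Int) (h : 1 ≤ input_dim) :
    ensembleLoopA input_dim (PySem.List.pyRange 0 32 1) = some (input_dim, 0) := by
  have h1 : PySem.List.pyRange 0 32 1 = 0 :: PySem.List.pyRange 1 32 1 := by decide
  rw [h1]
  simp only [ensembleLoopA]
  have hm : PySem.Int.mod input_dim (0 + 1) = 0 := by
    simp
  have hd : PySem.Int.floordiv input_dim (0 + 1) = input_dim := by
    simp
  rw [hm, hd]
  simp [h]

-- ===== VERDICT (by name: the statement is the Claim_ definition above) =====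
theorem ensemble_ny_his_for_input_dim_spec : Claim_equal_ensemble_ny_his_for_input_dim := by
  intro n _ hpre
  unfold Pre_ensemble_ny_his_for_input_dim at hpre
  unfold Spec_ensemble_ny_his_for_input_dim ensemble_ny_his_for_input_dim ensemble_ny_his_for_input_dim_alt
  by_cases h122 : n = 122
  · subst h122; decide
  by_cases h183 : n = 183
  · subst h183; decide
  by_cases h24 : n = 24
  · subst h24; decide
  have hspec : ensembleSpecial
      = ((PySem.Dict.empty.insert 122 (61, 1)).insert 183 (61, 2)).insert 24 (8, 2) := by decide
  have hget : PySem.Dict.get? ensembleSpecial n = none := by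
    rw [hspec]
    simp [PySem.Dict.get?_insert, h122, h183, h24, PySem.Dict.get?_empty]
  rw [hget, ensembleLoopA_pos n hpre]
  simp only [if_neg h122, if_neg h183, if_neg h24, Option.getD_some, if_pos hpre]
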